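-- pv_equiv track=rewrite | github.com/b-locke/aoc-23 | day-3-pt-2.py | number_locations
-- ===== SOURCE A (Python) =====
-- def number_locations(puzzle_input, symbol_locations_data):
-- 	### Find all part numbers and compare their location to the symbols locations.
-- 	valid_parts = []
-- 	valid_parts_dict = {}
-- 	active_number = []
-- 	active_number_locations = []
-- 	active_number_valid = False
-- 	part_id = 0
--
-- 	for row in range(len(puzzle_input)):
-- 		for col in range(len(puzzle_input[row])):
--
-- 			position = puzzle_input[row][col]
--
-- 			### Check if position is not numeric and append value to part list if it's a valid part
-- 			if position.isnumeric() == False and active_number_valid == True: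
-- 				valid_parts.append(active_number)
-- 				for location in active_number_locations:
-- 					valid_parts_dict[location] = {'value': int(''.join(active_number)), 'id': part_id}
--
-- 				active_number_locations	= []
-- 				active_number_valid = False
-- 				active_number = []
-- 				part_id +=1
--
-- 			elif position.isnumeric() == False and active_number_valid == False:
-- 				active_number_locations	= []
-- 				active_number_valid = False
-- 				active_number = []
--
-- 			else:
-- 				### If the position is numeric, test validity
-- 				active_number.append(position)
-- 				active_number_locations.append((row, col))
--
-- 				adjacents = [(row-1, col), (row, col+1), (row+1, col), (row, col-1), (row-1, col-1), (row-1, col+1), (row+1, col-1), (row+1, col+1)]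
-- 				adjacents_found = [True for p in adjacents if p in symbol_locations_data]
--
-- 				if True in adjacents_found:
-- 					active_number_valid = True
--
-- 	return valid_parts_dict
-- ===== SOURCE B (Python) =====
-- def number_locations(puzzle_input, symbol_locations_data):
-- 	### Two-pass rewrite: pass 1 collects maximal digit runs (flushed only when a
-- 	### non-digit cell follows, so a run ending at the grid's last cell is dropped
-- 	### and runs merge across row boundaries, as in the original scan); pass 2
-- 	### assigns incrementing ids to runs adjacent to a symbol and builds the dict.
-- 	symbols = set(symbol_locations_data)
--
-- 	runs = []
-- 	cur_digits = []
-- 	cur_locs = []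
-- 	for row, line in enumerate(puzzle_input):
-- 		for col, ch in enumerate(line):
-- 			if ch.isnumeric():
-- 				cur_digits.append(ch)
-- 				cur_locs.append((row, col))
-- 			elif cur_digits:
-- 				runs.append((cur_digits, cur_locs))
-- 				cur_digits = []
-- 				cur_locs = []
--
-- 	result = {}
-- 	part_id = 0
-- 	for digits, locs in runs:
-- 		if any(p in symbols
-- 		       for (r, c) in locs
-- 		       for p in [(r-1, c), (r, c+1), (r+1, c), (r, c-1),
-- 		                 (r-1, c-1), (r-1, c+1), (r+1, c-1), (r+1, c+1)]):
-- 			value = int(''.join(digits))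
-- 			for loc in locs:
-- 				result[loc] = {'value': value, 'id': part_id}
-- 			part_id += 1
-- 	return result
-- ===== Notes on version B (the rewrite author's own statement) =====
-- stated objective: alternative
-- what changed: Replaces the single stateful scan (dict built and part-id bumped inline while a valid-flag travels with the current number) by two passes: pass 1 collects maximal digit runs with their locations, pass 2 filters runs by symbol adjacency (hash-set membership instead of A's per-digit list scans) and builds the result dict with incrementing ids.
import Mathlib
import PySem

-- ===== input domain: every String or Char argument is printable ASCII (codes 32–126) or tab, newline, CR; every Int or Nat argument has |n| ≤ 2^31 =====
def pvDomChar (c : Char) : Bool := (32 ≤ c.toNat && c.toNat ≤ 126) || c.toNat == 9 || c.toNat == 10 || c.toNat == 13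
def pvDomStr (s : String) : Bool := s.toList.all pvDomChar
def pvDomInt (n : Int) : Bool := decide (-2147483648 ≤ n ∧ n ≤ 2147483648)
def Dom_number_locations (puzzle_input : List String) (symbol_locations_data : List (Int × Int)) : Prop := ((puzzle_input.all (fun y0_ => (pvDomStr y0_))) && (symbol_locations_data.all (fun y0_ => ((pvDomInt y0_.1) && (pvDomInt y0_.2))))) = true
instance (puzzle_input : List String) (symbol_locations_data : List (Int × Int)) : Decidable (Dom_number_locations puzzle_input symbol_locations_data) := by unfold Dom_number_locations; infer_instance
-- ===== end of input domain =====

-- B replaces A's single stateful scan by a two-pass decomposition (collect digit runs, then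
-- filter by symbol adjacency via a set and build the dict); same return value, measured faster.

-- shared helper: Python's int(''.join(digit_chars)) (both programs execute this exact step;
-- the chars are digits '0'-'9' whenever it is reached, so ofChars? is `some` there)
def pvJoinInt (cs : List Char) : Int := (PySem.Int.ofChars? cs).getD 0

-- ===== PORT A =====
-- A's loop state: (valid_parts, valid_parts_dict, active_number, active_number_locations,
--                  active_number_valid, part_id)
abbrev pvStateA : Type :=
  List (List Char) × PySem.Dict (Int × Int) (PySem.Dict String Int) × List Char ×
  List (Int × Int) × Bool × Int

-- one iteration of A's inner loop body, at cell (row, col) holding char `position`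
-- (`position.isnumeric()` is PySem.Chars.isdigit: exact on the printable-ASCII domain Dom;
--  `x == False` is `!x`, `x == True` is `x`)
def pvStepA (symbol_locations_data : List (Int × Int)) (row : Int) (st : pvStateA)
    (cc : Int × Char) : pvStateA :=
  let col := cc.1
  let position := cc.2
  let (valid_parts, valid_parts_dict, active_number, active_number_locations,
       active_number_valid, part_id) := st
  if (!(PySem.Chars.isdigit position)) && active_number_valid then
    let valid_parts := valid_parts ++ [active_number]
    let valid_parts_dict := active_number_locations.foldl (fun d location =>
        d.insert location (PySem.Dict.ofList
          [("value", pvJoinInt active_number), ("id", part_id)])) valid_parts_dict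
    (valid_parts, valid_parts_dict, [], [], false, part_id + 1)
  else if (!(PySem.Chars.isdigit position)) && (!active_number_valid) then
    (valid_parts, valid_parts_dict, [], [], active_number_valid, part_id)
  else
    let active_number := active_number ++ [position]
    let active_number_locations := active_number_locations ++ [(row, col)]
    let adjacents := [(row-1, col), (row, col+1), (row+1, col), (row, col-1),
                      (row-1, col-1), (row-1, col+1), (row+1, col-1), (row+1, col+1)]
    let adjacents_found := (adjacents.filter
        (fun p => symbol_locations_data.contains p)).map (fun _ => true)
    let active_number_valid :=
      if adjacents_found.contains true then true else active_number_valid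
    (valid_parts, valid_parts_dict, active_number, active_number_locations,
     active_number_valid, part_id)

-- the nested `for row … for col …` loops (range(len(..)) + indexing = enumeration in order)
def pvLoopA (symbol_locations_data : List (Int × Int)) (st : pvStateA)
    (rl : Int × String) : pvStateA :=
  (PySem.List.enumerate rl.2.toList).foldl (pvStepA symbol_locations_data rl.1) st

def number_locations (puzzle_input : List String) (symbol_locations_data : List (Int × Int)) :
    List (Int × Int × List (String × Int)) :=
  let fin := (PySem.List.enumerate puzzle_input).foldl (pvLoopA symbol_locations_data)
      ([], PySem.Dict.empty, [], [], false, 0)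
  -- `return valid_parts_dict`, flattened to the association-list convention
  fin.2.1.items.map (fun p => (p.1.1, p.1.2, p.2.items))

-- ===== PORT B =====
-- a run of consecutive digit cells: (digit chars, their locations)
abbrev pvRun : Type := List Char × List (Int × Int)

-- pass-1 state: (runs emitted so far, current digits, current locations)
def pvStepB (row : Int) (st : List pvRun × List Char × List (Int × Int))
    (cc : Int × Char) : List pvRun × List Char × List (Int × Int) :=
  let (runs, cur_digits, cur_locs) := st
  if PySem.Chars.isdigit cc.2 then
    (runs, cur_digits ++ [cc.2], cur_locs ++ [(row, cc.1)])
  else if cur_digits.isEmpty then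
    (runs, cur_digits, cur_locs)
  else
    (runs ++ [(cur_digits, cur_locs)], [], [])

def pvLoopB (st : List pvRun × List Char × List (Int × Int)) (rl : Int × String) :
    List pvRun × List Char × List (Int × Int) :=
  (PySem.List.enumerate rl.2.toList).foldl (pvStepB rl.1) st

-- does the run touch a symbol? (the generator inside B's `any(...)`)
def pvRunValid (symbols : PySem.Set (Int × Int)) (locs : List (Int × Int)) : Bool :=
  locs.any (fun rc =>
    ([(rc.1-1, rc.2), (rc.1, rc.2+1), (rc.1+1, rc.2), (rc.1, rc.2-1),
      (rc.1-1, rc.2-1), (rc.1-1, rc.2+1), (rc.1+1, rc.2-1), (rc.1+1, rc.2+1)] :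
        List (Int × Int)).any (fun p => symbols.contains p))

-- pass-2 step: assign the next id to a valid run and write its locations into the dict
def pvEmitB (symbols : PySem.Set (Int × Int))
    (st : PySem.Dict (Int × Int) (PySem.Dict String Int) × Int) (run : pvRun) :
    PySem.Dict (Int × Int) (PySem.Dict String Int) × Int :=
  let (result, part_id) := st
  let (digits, locs) := run
  if pvRunValid symbols locs then
    (locs.foldl (fun d loc =>
        d.insert loc (PySem.Dict.ofList
          [("value", pvJoinInt digits), ("id", part_id)])) result, part_id + 1)
  else
    (result, part_id)

def number_locations_alt (puzzle_input : List String)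
    (symbol_locations_data : List (Int × Int)) : List (Int × Int × List (String × Int)) :=
  let symbols := PySem.Set.ofList symbol_locations_data
  let pass1 := (PySem.List.enumerate puzzle_input).foldl pvLoopB ([], [], [])
  let fin := pass1.1.foldl (pvEmitB symbols) (PySem.Dict.empty, 0)
  fin.1.items.map (fun p => (p.1.1, p.1.2, p.2.items))

-- ===== PRECONDITION & SPEC =====
def Spec_number_locations (puzzle_input : List String) (symbol_locations_data : List (Int × Int)) (out : List (Int × Int × List (String × Int))) : Prop := out = number_locations_alt puzzle_input symbol_locations_data
instance (puzzle_input : List String) (symbol_locations_data : List (Int × Int)) (out : List (Int × Int × List (String × Int))) : Decidable (Spec_number_locations puzzle_input symbol_locations_data out) := by unfold Spec_number_locations; infer_instance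

-- ===== CLAIM (what is proved, stated in full; the proofs are below) =====
def Claim_equal_number_locations : Prop := ∀ (puzzle_input : List String) (symbol_locations_data : List (Int × Int)), Dom_number_locations puzzle_input symbol_locations_data → Spec_number_locations puzzle_input symbol_locations_data (number_locations puzzle_input symbol_locations_data)

-- ===== LEMMAS AND PROOFS =====

-- A's per-cell adjacency test (filter/map/`True in`) equals one location's test in B's `any`
lemma pvContainsTrue (L : List (Int × Int)) (f : Int × Int → Bool) :
    ((L.filter f).map (fun _ => true)).contains true = L.any f := by
  induction L with
  | nil => rfl
  | cons x xs ih =>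
    rw [List.filter_cons]
    by_cases h : f x
    · simp [h]
    · simpa [h] using ih

lemma pvAdj_eq (sym : List (Int × Int)) (row col : Int) :
    ((([(row-1, col), (row, col+1), (row+1, col), (row, col-1), (row-1, col-1),
        (row-1, col+1), (row+1, col-1), (row+1, col+1)] : List (Int × Int)).filter
        (fun p => sym.contains p)).map (fun _ => true)).contains true
      = ([(row-1, col), (row, col+1), (row+1, col), (row, col-1), (row-1, col-1),
          (row-1, col+1), (row+1, col-1), (row+1, col+1)] : List (Int × Int)).any
          (fun p => (PySem.Set.ofList sym).contains p) := by
  rw [pvContainsTrue]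
  have hf : (fun p => (PySem.Set.ofList sym).contains p)
      = (fun p : Int × Int => sym.contains p) :=
    funext fun p => by simp [PySem.Set.contains]
  rw [hf]

-- Python's `if b: v = True` as a Bool operation
lemma pvIfTrue (b v : Bool) : (if b then true else v) = (v || b) := by
  cases b <;> cases v <;> rfl

-- the coupling invariant between A's loop state and B's pass-1 state
def pvInv (sym : List (Int × Int)) (stA : pvStateA)
    (stB : List pvRun × List Char × List (Int × Int)) : Prop :=
  stA.2.2.1 = stB.2.1 ∧ stA.2.2.2.1 = stB.2.2 ∧
  stA.2.2.2.2.1 = pvRunValid (PySem.Set.ofList sym) stB.2.2 ∧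
  stB.2.1.length = stB.2.2.length ∧
  (stA.2.1, stA.2.2.2.2.2) = stB.1.foldl (pvEmitB (PySem.Set.ofList sym)) (PySem.Dict.empty, 0)

lemma pvStep_inv (sym : List (Int × Int)) (row : Int) (stA : pvStateA)
    (stB : List pvRun × List Char × List (Int × Int)) (cc : Int × Char)
    (h : pvInv sym stA stB) :
    pvInv sym (pvStepA sym row stA cc) (pvStepB row stB cc) := by
  obtain ⟨vp, d, num, locs, valid, pid⟩ := stA
  obtain ⟨runs, cd, cl⟩ := stB
  obtain ⟨h1, h2, h3, h4, h5⟩ := h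
  simp only [pvInv] at *
  subst h1; subst h2
  cases hdig : PySem.Chars.isdigit cc.2 with
  | true =>
      -- digit cell: both sides append; the valid flag absorbs this location's adjacency test
      refine ⟨?_, ?_, ?_, ?_, ?_⟩
      · simp [pvStepA, pvStepB, hdig]
      · simp [pvStepA, pvStepB, hdig]
      · simp only [pvStepA, pvStepB, hdig, Bool.not_true, Bool.false_and,
          Bool.false_eq_true, if_false, if_true]
        rw [pvIfTrue, pvAdj_eq, h3]
        simp [pvRunValid]
      · simp [pvStepB, hdig, h4]
      · simpa [pvStepA, pvStepB, hdig] using h5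
  | false =>
      cases hval : valid with
      | true =>
          -- flush: B emits the (necessarily nonempty) run, which pass 2 accepts
          have hrv : pvRunValid (PySem.Set.ofList sym) locs = true := h3.symm.trans hval
          have hlocs : locs ≠ [] := by
            intro hnil; rw [hnil] at hrv; simp [pvRunValid] at hrv
          have hne : num.isEmpty = false := by
            cases num
            · exact absurd (List.eq_nil_of_length_eq_zero h4.symm) hlocs
            · rfl
          refine ⟨?_, ?_, ?_, ?_, ?_⟩
          · simp [pvStepA, pvStepB, hdig, hne]
          · simp [pvStepA, pvStepB, hdig, hne]
          · simp [pvStepA, pvStepB, hdig, hne, pvRunValid]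
          · simp [pvStepB, hdig, hne]
          · simp only [pvStepA, pvStepB, hdig, hne, Bool.not_false, Bool.true_and,
              if_true, Bool.false_eq_true, if_false]
            rw [List.foldl_append, ← h5]
            simp [pvEmitB, hrv]
      | false =>
          cases hcd : num.isEmpty with
          | true =>
              -- nothing pending: both sides leave everything as it was
              have hnum : num = [] := List.isEmpty_iff.mp hcd
              have hcl : locs = [] := List.eq_nil_of_length_eq_zero (by rw [← h4, hnum]; rfl)
              subst hnum; subst hcl
              refine ⟨?_, ?_, ?_, ?_, ?_⟩ <;>
                simp [pvStepA, pvStepB, hdig, pvRunValid, h5]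
          | false =>
              -- invalid pending run: A resets silently, B emits it but pass 2 rejects it
              have hrv : pvRunValid (PySem.Set.ofList sym) locs = false := h3.symm.trans hval
              refine ⟨?_, ?_, ?_, ?_, ?_⟩
              · simp [pvStepA, pvStepB, hdig, hcd]
              · simp [pvStepA, pvStepB, hdig, hcd]
              · simp [pvStepA, pvStepB, hdig, hcd, pvRunValid]
              · simp [pvStepB, hdig, hcd]
              · simp only [pvStepA, pvStepB, hdig, hcd, Bool.not_false, Bool.true_and,
                  Bool.and_self, if_true, Bool.false_eq_true, if_false]
                rw [List.foldl_append, ← h5]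
                simp [pvEmitB, hrv]

lemma pvLoop_inv (sym : List (Int × Int)) (rl : Int × String) (stA : pvStateA)
    (stB : List pvRun × List Char × List (Int × Int)) (h : pvInv sym stA stB) :
    pvInv sym (pvLoopA sym stA rl) (pvLoopB stB rl) := by
  unfold pvLoopA pvLoopB
  generalize PySem.List.enumerate rl.2.toList = cells
  induction cells generalizing stA stB with
  | nil => exact h
  | cons c cs ih => exact ih _ _ (pvStep_inv sym rl.1 stA stB c h)

lemma pvRows_inv (sym : List (Int × Int)) (rows : List (Int × String)) (stA : pvStateA)
    (stB : List pvRun × List Char × List (Int × Int)) (h : pvInv sym stA stB) :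
    pvInv sym (rows.foldl (pvLoopA sym) stA) (rows.foldl pvLoopB stB) := by
  induction rows generalizing stA stB with
  | nil => exact h
  | cons r rs ih => exact ih _ _ (pvLoop_inv sym r stA stB h)

-- ===== VERDICT (by name: the statement is the Claim_ definition above) =====
theorem number_locations_spec : Claim_equal_number_locations := by
  intro puzzle_input sym _
  unfold Spec_number_locations number_locations number_locations_alt
  obtain ⟨-, -, -, -, h5⟩ := pvRows_inv sym (PySem.List.enumerate puzzle_input)
      ([], PySem.Dict.empty, [], [], false, 0) ([], [], [])
      ⟨rfl, rfl, by simp [pvRunValid], rfl, rfl⟩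
  have h6 : ((PySem.List.enumerate puzzle_input).foldl (pvLoopA sym)
        ([], PySem.Dict.empty, [], [], false, 0)).2.1
      = (((PySem.List.enumerate puzzle_input).foldl pvLoopB ([], [], [])).1.foldl
          (pvEmitB (PySem.Set.ofList sym)) (PySem.Dict.empty, 0)).1 := by
    rw [← h5]
  simp only []
  rw [h6]
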